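-- pv_equiv track=rewrite | github.com/renaldyhidayatt/Practice-python | leetcode/BitManipulation/distributerepeatingintegers/distribu.py | dfs
-- ===== SOURCE A (Python) =====
-- from typing import List, Dict
--
-- def dfs(freq: Dict, quantity: List[int]) -> bool:
--     if len(quantity) == 0:
--         return True
--
--     visited: Dict = {}
--
--     for i in freq:
--         if freq[i] in visited:
--             continue
--
--         visited[freq[i]] = True
--
--         if freq[i] >= quantity[0]:
--             freq[i] -= quantity[0]
--             if dfs(freq, quantity[1:]):
--                 return True
--             freq[i] += quantity[0]
--
--     return False
-- ===== SOURCE B (Python) =====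
-- def dfs(freq, quantity):
--     # Alternative algorithm: instead of backtracking per customer over the dict's keys
--     # (with a visited-value set and in-place mutation/undo), recurse over the frequency
--     # buckets: each bucket picks the sub-list of still-unserved demands it will serve,
--     # memoising on (number of buckets left, remaining demand list).
--     memo = {}
--
--     def go(counts, rem):
--         if not rem:
--             return True
--         if not counts:
--             return False
--         key = (len(counts), tuple(rem))
--         if key in memo:
--             return memo[key]
--         c = counts[0]
--         rest = counts[1:]
--
--         def pick(c, pending, kept):
--             # bucket serves a feasible sub-list of pending (in order);
--             # kept = demands already left for the later buckets
--             if not pending: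
--                 return go(rest, kept)
--             q = pending[0]
--             if c >= q and pick(c - q, pending[1:], kept):
--                 return True
--             return pick(c, pending[1:], kept + [q])
--
--         ans = pick(c, rem, [])
--         memo[key] = ans
--         return ans
--
--     return go(list(freq.values()), quantity)
-- ===== Notes on version B (the rewrite author's own statement) =====
-- stated objective: alternative
-- what changed: B replaces A's per-customer backtracking over the dict's keys (visited-value pruning, in-place mutation and undo of the dict) by a memoised recursion over the frequency buckets: each bucket chooses the sub-list of still-unserved demands it serves, with results cached per (buckets left, remaining demands).
import Mathlib
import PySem

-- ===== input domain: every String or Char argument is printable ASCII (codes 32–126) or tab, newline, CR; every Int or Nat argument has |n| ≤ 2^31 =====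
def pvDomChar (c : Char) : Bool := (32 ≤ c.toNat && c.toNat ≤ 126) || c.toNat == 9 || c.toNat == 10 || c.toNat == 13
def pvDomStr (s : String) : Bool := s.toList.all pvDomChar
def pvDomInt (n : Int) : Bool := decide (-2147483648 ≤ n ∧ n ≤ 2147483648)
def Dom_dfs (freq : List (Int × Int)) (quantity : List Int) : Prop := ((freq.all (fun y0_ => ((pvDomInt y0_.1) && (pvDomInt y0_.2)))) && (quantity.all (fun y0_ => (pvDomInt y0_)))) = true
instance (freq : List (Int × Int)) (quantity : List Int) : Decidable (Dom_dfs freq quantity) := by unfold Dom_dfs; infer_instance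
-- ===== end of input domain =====

-- B changes the algorithm (recursion over buckets choosing demand sub-lists, instead of
-- backtracking over customers mutating the dict); equivalence is about the return value only
-- (Python A mutates its freq dict in place when it returns True).

-- ===== PORT A =====
-- A's recursion: dfsGo is the recursive function, dfsLoop its `for i in freq` loop
-- (the dict is restored by `freq[i] += quantity[0]` before the loop continues).
mutual
def dfsGo (d : PySem.Dict Int Int) (quantity : List Int) : Bool :=
  match quantity with
  | [] => true
  | q :: qs => dfsLoop d.keys d PySem.Dict.empty q qs
  termination_by (quantity.length, 0)
def dfsLoop (ks : List Int) (d : PySem.Dict Int Int) (visited : PySem.Dict Int Bool)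
    (q : Int) (qs : List Int) : Bool :=
  match ks with
  | [] => false
  | k :: ks' =>
    let v := d.getD k 0          -- freq[i]; i comes from freq's keys, so the key is present
    if visited.contains v then dfsLoop ks' d visited q qs
    else
      let visited' := visited.insert v true
      if v ≥ q then
        let d' := d.insert k (v - q)
        if dfsGo d' qs then true
        else dfsLoop ks' (d'.insert k ((v - q) + q)) visited' q qs
      else dfsLoop ks' d visited' q qs
  termination_by (qs.length, ks.length)
end

def dfs (freq : List (Int × Int)) (quantity : List Int) : Bool :=
  dfsGo (PySem.Dict.mk freq) quantity

-- ===== PORT B =====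
mutual
def goM (counts : List Int) (rem : List Int)
    (memo : PySem.Dict (Int × List Int) Bool) : Bool × PySem.Dict (Int × List Int) Bool :=
  if rem.isEmpty then (true, memo)
  else
    match counts with
    | [] => (false, memo)
    | c :: rest =>
      match memo.get? (((rest.length : Int) + 1, rem)) with
      | some b => (b, memo)
      | none =>
        let r := pickM c rest rem [] memo
        (r.1, r.2.insert (((rest.length : Int) + 1, rem)) r.1)
  termination_by (counts.length, 0)
def pickM (c : Int) (rest : List Int) (pending : List Int) (kept : List Int)
    (memo : PySem.Dict (Int × List Int) Bool) : Bool × PySem.Dict (Int × List Int) Bool :=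
  match pending with
  | [] => goM rest kept memo
  | q :: p' =>
    if c ≥ q then
      let r := pickM (c - q) rest p' kept memo
      if r.1 then (true, r.2)
      else pickM c rest p' (kept ++ [q]) r.2
    else pickM c rest p' (kept ++ [q]) memo
  termination_by (rest.length, pending.length + 1)
end

def dfs_alt (freq : List (Int × Int)) (quantity : List Int) : Bool :=
  (goM (PySem.Dict.mk freq).values quantity PySem.Dict.empty).1

-- ===== PRECONDITION & SPEC =====
-- Pre_ excludes association lists with duplicate keys: they do not represent any Python
-- dict (a Python dict cannot hold a duplicate key), so A's behaviour on them is undefined.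
def Pre_dfs (freq : List (Int × Int)) (quantity : List Int) : Prop :=
  (freq.map Prod.fst).Nodup
instance (freq : List (Int × Int)) (quantity : List Int) : Decidable (Pre_dfs freq quantity) := by
  unfold Pre_dfs; infer_instance

def pvWitness_dfs : (List (Int × Int)) × List Int := ([(1, 3), (2, 2)], [2, 2])

def Spec_dfs (freq : List (Int × Int)) (quantity : List Int) (out : Bool) : Prop := out = dfs_alt freq quantity
instance (freq : List (Int × Int)) (quantity : List Int) (out : Bool) : Decidable (Spec_dfs freq quantity out) := by unfold Spec_dfs; infer_instance

-- ===== CLAIM (what is proved, stated in full; the proofs are below) =====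
def Claim_equal_dfs : Prop := ∀ (freq : List (Int × Int)) (quantity : List Int), Dom_dfs freq quantity → Pre_dfs freq quantity → Spec_dfs freq quantity (dfs freq quantity)

-- ===== LEMMAS AND PROOFS =====

-- The common specification: the multiset m of remaining bucket sizes can serve the
-- demand list qs, one demand at a time, each from some bucket that still covers it.
def MCan (m : Multiset Int) (qs : List Int) : Prop :=
  match qs with
  | [] => True
  | q :: qs' => ∃ c ∈ m, q ≤ c ∧ MCan ((m.erase c).cons (c - q)) qs'

-- proof-side: a bucket of size c can serve these demands in this order
def feas (c : Int) (items : List Int) : Bool :=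
  match items with
  | [] => true
  | q :: rest => if c < q then false else feas (c - q) rest

-- proof-side: all ways to split a list into a taken sub-list and its complement
def splits (l : List Int) : List (List Int × List Int) :=
  match l with
  | [] => [([], [])]
  | q :: l' => (splits l').flatMap (fun p => [(q :: p.1, p.2), (p.1, q :: p.2)])

lemma mem_splits_cons (q : Int) (l : List Int) (p : List Int × List Int) :
    p ∈ splits (q :: l) ↔
      (∃ p' ∈ splits l, p = (q :: p'.1, p'.2)) ∨ (∃ p' ∈ splits l, p = (p'.1, q :: p'.2)) := by
  simp only [splits, List.mem_flatMap, List.mem_cons, List.not_mem_nil, or_false]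
  constructor
  · rintro ⟨a, ha, (rfl | rfl)⟩
    · exact Or.inl ⟨a, ha, rfl⟩
    · exact Or.inr ⟨a, ha, rfl⟩
  · rintro (⟨a, ha, rfl⟩ | ⟨a, ha, rfl⟩)
    · exact ⟨a, ha, Or.inl rfl⟩
    · exact ⟨a, ha, Or.inr rfl⟩

lemma feas_cons_of_le {c q : Int} (hq : q ≤ c) (l : List Int) :
    feas c (q :: l) = feas (c - q) l := by
  simp [feas, not_lt.2 hq]

-- key exchange lemma: peeling one bucket off the multiset = choosing its served sub-list
lemma MCan_cons (qs : List Int) : ∀ (c : Int) (m : Multiset Int),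
    MCan (c ::ₘ m) qs ↔ ∃ p ∈ splits qs, feas c p.1 = true ∧ MCan m p.2 := by
  induction qs with
  | nil =>
    intro c m
    simp [MCan, splits, feas]
  | cons q qs ih =>
    intro c m
    constructor
    · rintro ⟨c', hc', hq, hrec⟩
      by_cases hm : c' ∈ m
      · -- the first demand q is served from a bucket of m: it goes to the "rest" part
        have key : ((c ::ₘ m).erase c').cons (c' - q) = c ::ₘ ((m.erase c').cons (c' - q)) := by
          by_cases hcc : c' = c
          · subst hcc
            rw [Multiset.erase_cons_head]
            rw [show (m.erase c').cons (c' - q) = (c' - q) ::ₘ m.erase c' from rfl]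
            rw [Multiset.cons_swap, Multiset.cons_erase hm]
          · rw [Multiset.erase_cons_tail_of_mem hm]
            exact Multiset.cons_swap _ _ _
        rw [key] at hrec
        obtain ⟨p, hp, hf, hm2⟩ := (ih c _).1 hrec
        refine ⟨(p.1, q :: p.2), ?_, hf, ?_⟩
        · exact (mem_splits_cons q qs _).2 (Or.inr ⟨p, hp, rfl⟩)
        · exact ⟨c', hm, hq, hm2⟩
      · -- then c' = c: the first demand is served from the peeled bucket c
        have hcc : c' = c := (Multiset.mem_cons.1 hc').resolve_right hm
        subst hcc
        rw [Multiset.erase_cons_head] at hrec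
        obtain ⟨p, hp, hf, hm2⟩ := (ih (c' - q) m).1 hrec
        refine ⟨(q :: p.1, p.2), ?_, ?_, hm2⟩
        · exact (mem_splits_cons q qs _).2 (Or.inl ⟨p, hp, rfl⟩)
        · rw [feas_cons_of_le hq]; exact hf
    · rintro ⟨p, hp, hf, hm2⟩
      rcases (mem_splits_cons q qs p).1 hp with ⟨a, ha, rfl⟩ | ⟨a, ha, rfl⟩
      · -- q taken by the peeled bucket c
        have hqc : q ≤ c := by
          by_contra hlt
          simp [feas, lt_of_not_ge hlt] at hf
        rw [feas_cons_of_le hqc] at hf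
        have hrec : MCan ((c - q) ::ₘ m) qs := (ih (c - q) m).2 ⟨a, ha, hf, hm2⟩
        exact ⟨c, Multiset.mem_cons_self _ _, hqc, by
          rw [Multiset.erase_cons_head]; exact hrec⟩
      · -- q served by a bucket of m
        obtain ⟨c', hc'm, hq, hrec⟩ := hm2
        have hall : MCan (c ::ₘ ((m.erase c').cons (c' - q))) qs := (ih c _).2 ⟨a, ha, hf, hrec⟩
        refine ⟨c', Multiset.mem_cons_of_mem hc'm, hq, ?_⟩
        have key : ((c ::ₘ m).erase c').cons (c' - q) = c ::ₘ ((m.erase c').cons (c' - q)) := by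
          by_cases hcc : c' = c
          · subst hcc
            rw [Multiset.erase_cons_head]
            rw [show (m.erase c').cons (c' - q) = (c' - q) ::ₘ m.erase c' from rfl]
            rw [Multiset.cons_swap, Multiset.cons_erase hc'm]
          · rw [Multiset.erase_cons_tail_of_mem hc'm]
            exact Multiset.cons_swap _ _ _
        rw [key]; exact hall

-- B-side: memo invariant — every stored entry ((n, rem), b) answers "can the last n
-- buckets of counts0 serve rem", i.e. b ↔ MCan of that suffix
def MemoOK (counts0 : List Int) (memo : PySem.Dict (Int × List Int) Bool) : Prop :=
  ∀ (n : Int) (rem : List Int) (b : Bool), memo.get? ((n, rem)) = some b →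
    (b = true ↔ MCan (↑(counts0.drop (counts0.length - n.toNat))) rem)

lemma suffix_drop_eq {l l0 : List Int} (h : l <:+ l0) :
    l0.drop (l0.length - l.length) = l := by
  obtain ⟨t, rfl⟩ := h
  rw [List.length_append, Nat.add_sub_cancel, List.drop_left]

lemma pickM_correct (counts0 rest : List Int)
    (hgo : ∀ (rem : List Int) memo, MemoOK counts0 memo →
      (((goM rest rem memo).1 = true) ↔ MCan (↑rest) rem) ∧ MemoOK counts0 (goM rest rem memo).2) :
    ∀ (pending : List Int) (c : Int) (kept : List Int) memo, MemoOK counts0 memo →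
      (((pickM c rest pending kept memo).1 = true) ↔
        ∃ p ∈ splits pending, feas c p.1 = true ∧ MCan (↑rest) (kept ++ p.2)) ∧
      MemoOK counts0 (pickM c rest pending kept memo).2 := by
  intro pending
  induction pending with
  | nil =>
    intro c kept memo hm
    obtain ⟨h1, h2⟩ := hgo kept memo hm
    have he : pickM c rest [] kept memo = goM rest kept memo := by rw [pickM]
    refine ⟨?_, by rw [he]; exact h2⟩
    rw [he, h1]
    simp [splits, feas]
  | cons q p' ihp =>
    intro c kept memo hm
    by_cases hcq : c ≥ q
    · rw [show pickM c rest (q :: p') kept memo =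
        (if (pickM (c - q) rest p' kept memo).1 then (true, (pickM (c - q) rest p' kept memo).2)
         else pickM c rest p' (kept ++ [q]) (pickM (c - q) rest p' kept memo).2) from by
          rw [pickM, if_pos hcq]]
      obtain ⟨ht1, ht2⟩ := ihp (c - q) kept memo hm
      by_cases ht : (pickM (c - q) rest p' kept memo).1 = true
      · rw [if_pos ht]
        obtain ⟨p, hp, hf, hmc⟩ := ht1.1 ht
        refine ⟨⟨fun _ => ⟨(q :: p.1, p.2), (mem_splits_cons q p' _).2 (Or.inl ⟨p, hp, rfl⟩),
          by rw [feas_cons_of_le hcq]; exact hf, hmc⟩, fun _ => rfl⟩, ht2⟩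
      · rw [if_neg ht]
        obtain ⟨hs1, hs2⟩ := ihp c (kept ++ [q]) _ ht2
        refine ⟨?_, hs2⟩
        rw [hs1]
        constructor
        · rintro ⟨p, hp, hf, hmc⟩
          exact ⟨(p.1, q :: p.2), (mem_splits_cons q p' _).2 (Or.inr ⟨p, hp, rfl⟩), hf,
            by simpa using hmc⟩
        · rintro ⟨p, hp, hf, hmc⟩
          rcases (mem_splits_cons q p' p).1 hp with ⟨a, ha, rfl⟩ | ⟨a, ha, rfl⟩
          · exact absurd (ht1.2 ⟨a, ha, by rwa [feas_cons_of_le hcq] at hf, hmc⟩) ht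
          · exact ⟨a, ha, hf, by simpa using hmc⟩
    · rw [show pickM c rest (q :: p') kept memo = pickM c rest p' (kept ++ [q]) memo from by
        rw [pickM, if_neg hcq]]
      obtain ⟨hs1, hs2⟩ := ihp c (kept ++ [q]) memo hm
      refine ⟨?_, hs2⟩
      rw [hs1]
      constructor
      · rintro ⟨p, hp, hf, hmc⟩
        exact ⟨(p.1, q :: p.2), (mem_splits_cons q p' _).2 (Or.inr ⟨p, hp, rfl⟩), hf,
          by simpa using hmc⟩
      · rintro ⟨p, hp, hf, hmc⟩
        rcases (mem_splits_cons q p' p).1 hp with ⟨a, ha, rfl⟩ | ⟨a, ha, rfl⟩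
        · rw [show feas c (q :: a.1) = false from by simp [feas, lt_of_not_ge hcq]] at hf
          exact absurd hf (by simp)
        · exact ⟨a, ha, hf, by simpa using hmc⟩

lemma goM_correct (counts0 : List Int) : ∀ (counts rem : List Int) memo,
    counts <:+ counts0 → MemoOK counts0 memo →
    (((goM counts rem memo).1 = true) ↔ MCan (↑counts) rem) ∧
    MemoOK counts0 (goM counts rem memo).2 := by
  intro counts
  induction counts with
  | nil =>
    intro rem memo _ hm
    cases rem with
    | nil => exact ⟨by simp [goM, MCan], by simpa [goM] using hm⟩
    | cons q qs =>
      refine ⟨?_, by simpa [goM] using hm⟩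
      rw [show goM [] (q :: qs) memo = (false, memo) from by rw [goM]; rfl]
      simp [MCan]
  | cons c rest ihrest =>
    intro rem memo hsuf hm
    have hsufr : rest <:+ counts0 := (List.suffix_cons c rest).trans hsuf
    have hgo := fun rem memo hmm => ihrest rem memo hsufr hmm
    have hdrop : counts0.drop (counts0.length - ((rest.length : Int) + 1).toNat) = c :: rest := by
      rw [show ((rest.length : Int) + 1).toNat = (c :: rest).length from by
        simp only [List.length_cons]; omega]
      exact suffix_drop_eq hsuf
    cases rem with
    | nil => exact ⟨by simp [goM, MCan], by simpa [goM] using hm⟩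
    | cons q qs =>
      have hMC : (∃ p ∈ splits (q :: qs), feas c p.1 = true ∧ MCan (↑rest) ([] ++ p.2)) ↔
          MCan (↑(c :: rest)) (q :: qs) := by
        rw [show (↑(c :: rest) : Multiset Int) = c ::ₘ (↑rest : Multiset Int) from rfl,
          MCan_cons]
        simp
      cases hmk : memo.get? (((rest.length : Int) + 1, q :: qs)) with
      | some b =>
        rw [show goM (c :: rest) (q :: qs) memo = (b, memo) from by
          rw [goM]; simp [hmk]]
        have := hm _ _ _ hmk
        rw [hdrop] at this
        exact ⟨this, hm⟩
      | none =>
        obtain ⟨hp1, hp2⟩ := pickM_correct counts0 rest hgo (q :: qs) c [] memo hm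
        rw [show goM (c :: rest) (q :: qs) memo =
          ((pickM c rest (q :: qs) [] memo).1,
           (pickM c rest (q :: qs) [] memo).2.insert
             (((rest.length : Int) + 1, q :: qs)) (pickM c rest (q :: qs) [] memo).1) from by
          rw [goM]; simp [hmk]]
      -- result component and the updated memo
        refine ⟨by rw [hp1]; exact hMC, ?_⟩
        intro n rem' b hb
        rw [PySem.Dict.get?_insert] at hb
        by_cases hkey : (n, rem') = (((rest.length : Int) + 1, q :: qs))
        · rw [if_pos hkey] at hb
          injection hb with hb
          obtain ⟨hn, hr⟩ := Prod.ext_iff.1 hkey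
          subst hn; subst hr
          rw [hdrop, ← hb, hp1]
          exact hMC
        · rw [if_neg hkey] at hb
          exact hp2 _ _ _ hb

-- A-side dict lemmas
lemma map_if_id (k : Int) (w : Int × Int) (l : List (Int × Int)) (h : ∀ p ∈ l, p.1 ≠ k) :
    l.map (fun p => if p.1 == k then w else p) = l := by
  induction l with
  | nil => rfl
  | cons p l ihl =>
    simp only [List.map_cons]
    rw [if_neg (by simpa using h p List.mem_cons_self),
        ihl (fun p hp => h p (List.mem_cons_of_mem _ hp))]

lemma map_replace_id (k v : Int) : ∀ l : List (Int × Int),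
    (l.map (fun p => p.1)).Nodup → (k, v) ∈ l →
    l.map (fun p => if p.1 == k then (k, v) else p) = l := by
  intro l
  induction l with
  | nil => intro _ h; cases h
  | cons p l ihl =>
    intro hnd hmem
    rw [List.map_cons, List.nodup_cons] at hnd
    obtain ⟨hp1, hndl⟩ := hnd
    by_cases hpk : p.1 = k
    · have hpv : p = (k, v) := by
        rcases List.mem_cons.1 hmem with h | h
        · exact h.symm
        · exact absurd (hpk ▸ List.mem_map_of_mem (f := fun p => p.1) h) hp1
      have hrest : ∀ p' ∈ l, p'.1 ≠ k := by
        intro p' hp' hk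
        exact hp1 (by rw [hpk]; exact hk ▸ List.mem_map_of_mem (f := fun p => p.1) hp')
      subst hpv
      rw [List.map_cons, map_if_id k (k, v) l hrest]
      simp
    · have hmem' : (k, v) ∈ l := by
        rcases List.mem_cons.1 hmem with h | h
        · exact absurd (congrArg Prod.fst h.symm) hpk
        · exact h
      have hhead : (if p.1 == k then (k, v) else p) = p := by simp [hpk]
      rw [List.map_cons, hhead, ihl hndl hmem']

lemma map_snd_replace (k v w : Int) : ∀ l : List (Int × Int),
    (l.map (fun p => p.1)).Nodup → (k, v) ∈ l →
    (↑((l.map (fun p => if p.1 == k then (k, w) else p)).map (fun p => p.2)) : Multiset Int)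
      = w ::ₘ ((↑(l.map (fun p => p.2)) : Multiset Int).erase v) := by
  intro l
  induction l with
  | nil => intro _ h; cases h
  | cons p l ihl =>
    intro hnd hmem
    rw [List.map_cons, List.nodup_cons] at hnd
    obtain ⟨hp1, hndl⟩ := hnd
    by_cases hpk : p.1 = k
    · have hpv : p = (k, v) := by
        rcases List.mem_cons.1 hmem with h | h
        · exact h.symm
        · exact absurd (hpk ▸ List.mem_map_of_mem (f := fun p => p.1) h) hp1
      have hrest : ∀ p' ∈ l, p'.1 ≠ k := by
        intro p' hp' hk
        exact hp1 (by rw [hpk]; exact hk ▸ List.mem_map_of_mem (f := fun p => p.1) hp')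
      subst hpv
      rw [List.map_cons, map_if_id k (k, w) l hrest]
      simp [← Multiset.cons_coe]
    · have hmem' : (k, v) ∈ l := by
        rcases List.mem_cons.1 hmem with h | h
        · exact absurd (congrArg Prod.fst h.symm) hpk
        · exact h
      have hvmem : v ∈ l.map (fun p => p.2) := List.mem_map_of_mem (f := fun p => p.2) hmem'
      have hhead : (if p.1 == k then (k, w) else p) = p := by simp [hpk]
      rw [List.map_cons, hhead, List.map_cons, List.map_cons, ← Multiset.cons_coe,
          ← Multiset.cons_coe, ihl hndl hmem']
      by_cases hv : v = p.2
      · subst hv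
        rw [Multiset.erase_cons_head, Multiset.cons_swap]
        congr 1
        exact Multiset.cons_erase (Multiset.mem_coe.2 hvmem)
      · rw [Multiset.erase_cons_tail_of_mem (Multiset.mem_coe.2 hvmem), Multiset.cons_swap]

lemma contains_of_mem_items (d : PySem.Dict Int Int) (k v : Int) (h : (k, v) ∈ d.items) :
    d.contains k = true :=
  (PySem.Dict.contains_iff_mem_keys d k).2 (PySem.Dict.mem_keys_of_mem_items d h)

lemma insert_mem_eq (d : PySem.Dict Int Int) (k v : Int) (hnd : d.keys.Nodup)
    (h : d.get? k = some v) : d.insert k v = d := by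
  have hmem : (k, v) ∈ d.items := PySem.Dict.mem_items_of_get?_eq_some d h
  apply PySem.Dict.ext
  rw [PySem.Dict.items_insert_of_contains d v (contains_of_mem_items d k v hmem)]
  exact map_replace_id k v d.items hnd hmem

lemma values_insert_multiset (d : PySem.Dict Int Int) (k v w : Int) (hnd : d.keys.Nodup)
    (h : d.get? k = some v) :
    (↑(d.insert k w).values : Multiset Int) = w ::ₘ ((↑d.values : Multiset Int).erase v) := by
  have hmem : (k, v) ∈ d.items := PySem.Dict.mem_items_of_get?_eq_some d h
  have hitems := PySem.Dict.items_insert_of_contains d w (contains_of_mem_items d k v hmem)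
  simp only [PySem.Dict.values, hitems]
  exact map_snd_replace k v w d.items hnd hmem

lemma get?_of_mem_keys (d : PySem.Dict Int Int) (k : Int) (h : k ∈ d.keys) :
    d.get? k = some (d.getD k 0) := by
  cases hg : d.get? k with
  | none => exact absurd ((PySem.Dict.get?_eq_none_iff_not_mem_keys d k).1 hg) (by simp [h])
  | some v => rw [PySem.Dict.getD_eq_get?_getD, hg]; rfl

lemma exists_cons_of_not {α : Type} (P : α → Prop) (x : α) (l : List α) (hx : ¬ P x) :
    (∃ y ∈ l, P y) ↔ (∃ y ∈ x :: l, P y) := by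
  constructor
  · rintro ⟨y, hy, h⟩; exact ⟨y, List.mem_cons_of_mem _ hy, h⟩
  · rintro ⟨y, hy, h⟩
    rcases List.mem_cons.1 hy with rfl | hy'
    · exact absurd h hx
    · exact ⟨y, hy', h⟩

-- A-side: the `for i in freq` loop, assuming the recursion already decides MCan at depth qs
lemma dfsLoop_iff (q : Int) (qs : List Int)
    (hIH : ∀ d : PySem.Dict Int Int, d.keys.Nodup → (dfsGo d qs = true ↔ MCan (↑d.values) qs)) :
    ∀ (ks : List Int) (d : PySem.Dict Int Int) (visited : PySem.Dict Int Bool),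
      d.keys.Nodup → (∀ k ∈ ks, k ∈ d.keys) →
      (∀ v, visited.contains v = true →
        ¬ (q ≤ v ∧ MCan (((↑d.values : Multiset Int).erase v).cons (v - q)) qs)) →
      (dfsLoop ks d visited q qs = true ↔
        ∃ k ∈ ks, q ≤ d.getD k 0 ∧
          MCan (((↑d.values : Multiset Int).erase (d.getD k 0)).cons (d.getD k 0 - q)) qs) := by
  intro ks
  induction ks with
  | nil => intro d visited _ _ _; simp [dfsLoop]
  | cons k ks ihks =>
    intro d visited hnd hks hvis
    have hkd : k ∈ d.keys := hks k List.mem_cons_self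
    have hks' : ∀ k' ∈ ks, k' ∈ d.keys := fun k' hk' => hks k' (List.mem_cons_of_mem _ hk')
    have hget : d.get? k = some (d.getD k 0) := get?_of_mem_keys d k hkd
    simp only [dfsLoop]
    by_cases hvisv : visited.contains (d.getD k 0) = true
    · rw [if_pos hvisv, ihks d visited hnd hks' hvis]
      exact exists_cons_of_not _ k ks (hvis _ hvisv)
    · rw [if_neg hvisv]
      by_cases hq : d.getD k 0 ≥ q
      · rw [if_pos hq]
        have hcont : d.contains k = true := (PySem.Dict.contains_iff_mem_keys d k).2 hkd
        have hnd' : (d.insert k (d.getD k 0 - q)).keys.Nodup := by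
          rw [PySem.Dict.keys_insert_of_contains d (d.getD k 0 - q) hcont]; exact hnd
        have hvals' : (↑(d.insert k (d.getD k 0 - q)).values : Multiset Int)
            = (d.getD k 0 - q) ::ₘ ((↑d.values : Multiset Int).erase (d.getD k 0)) :=
          values_insert_multiset d k (d.getD k 0) (d.getD k 0 - q) hnd hget
        by_cases hrec : dfsGo (d.insert k (d.getD k 0 - q)) qs = true
        · rw [if_pos hrec]
          simp only [true_iff]
          refine ⟨k, List.mem_cons_self, hq, ?_⟩
          have := (hIH _ hnd').1 hrec
          rwa [hvals'] at this
        · rw [if_neg hrec]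
          have hrest : ((d.insert k (d.getD k 0 - q)).insert k (d.getD k 0 - q + q)) = d := by
            rw [PySem.Dict.insert_insert_self, show d.getD k 0 - q + q = d.getD k 0 by ring]
            exact insert_mem_eq d k (d.getD k 0) hnd hget
          have hnotry : ¬ (q ≤ d.getD k 0 ∧
              MCan (((↑d.values : Multiset Int).erase (d.getD k 0)).cons (d.getD k 0 - q)) qs) := by
            rintro ⟨-, hm⟩
            exact hrec ((hIH _ hnd').2 (by rwa [hvals']))
          have hvis' : ∀ v, (visited.insert (d.getD k 0) true).contains v = true →
              ¬ (q ≤ v ∧ MCan (((↑d.values : Multiset Int).erase v).cons (v - q)) qs) := by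
            intro v hc
            rw [PySem.Dict.contains_insert] at hc
            rcases Bool.or_eq_true_iff.1 hc with hc | hc
            · rw [show v = d.getD k 0 from by simpa using hc]
              exact hnotry
            · exact hvis v hc
          rw [hrest, ihks d (visited.insert (d.getD k 0) true) hnd hks' hvis']
          exact exists_cons_of_not _ k ks hnotry
      · rw [if_neg hq]
        have hnotry : ¬ (q ≤ d.getD k 0 ∧
            MCan (((↑d.values : Multiset Int).erase (d.getD k 0)).cons (d.getD k 0 - q)) qs) := by
          rintro ⟨hle, -⟩; exact hq hle
        have hvis' : ∀ v, (visited.insert (d.getD k 0) true).contains v = true →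
            ¬ (q ≤ v ∧ MCan (((↑d.values : Multiset Int).erase v).cons (v - q)) qs) := by
          intro v hc
          rw [PySem.Dict.contains_insert] at hc
          rcases Bool.or_eq_true_iff.1 hc with hc | hc
          · rw [show v = d.getD k 0 from by simpa using hc]
            exact hnotry
          · exact hvis v hc
        rw [ihks d (visited.insert (d.getD k 0) true) hnd hks' hvis']
        exact exists_cons_of_not _ k ks hnotry

lemma dfsGo_iff : ∀ (qs : List Int) (d : PySem.Dict Int Int), d.keys.Nodup →
    (dfsGo d qs = true ↔ MCan (↑d.values) qs) := by
  intro qs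
  induction qs with
  | nil => intro d _; simp [dfsGo, MCan]
  | cons q qs ih =>
    intro d hnd
    rw [dfsGo]
    rw [dfsLoop_iff q qs (fun d' hnd' => ih d' hnd') d.keys d PySem.Dict.empty hnd
        (fun k hk => hk) (by simp [PySem.Dict.contains_empty])]
    have hvals : d.values = d.keys.map (fun k => d.getD k 0) :=
      PySem.Dict.values_eq_map_keys d hnd 0
    constructor
    · rintro ⟨k, hk, hq, hm⟩
      exact ⟨d.getD k 0, by rw [hvals]; exact Multiset.mem_coe.2 (List.mem_map_of_mem hk), hq, hm⟩
    · rintro ⟨c, hc, hq, hm⟩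
      rw [hvals] at hc
      obtain ⟨k, hk, rfl⟩ := List.mem_map.1 (Multiset.mem_coe.1 hc)
      exact ⟨k, hk, hq, hm⟩

-- ===== VERDICT (by name: the statement is the Claim_ definition above) =====
theorem dfs_spec : Claim_equal_dfs := by
  intro freq quantity _hdom hpre
  unfold Spec_dfs dfs dfs_alt
  have hnd : (PySem.Dict.mk freq).keys.Nodup := hpre
  rw [Bool.eq_iff_iff, dfsGo_iff quantity _ hnd]
  have hempty : MemoOK (PySem.Dict.mk freq).values PySem.Dict.empty := by
    intro n rem b hb
    rw [PySem.Dict.get?_empty] at hb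
    cases hb
  exact ((goM_correct (PySem.Dict.mk freq).values (PySem.Dict.mk freq).values quantity
    PySem.Dict.empty List.suffix_rfl hempty).1).symm
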